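-- pv_equiv track=rewrite | github.com/mjunction-training/pr-review-bot-aws | github_utils.py | get_file_from_diff_line
-- ===== SOURCE A (Python) =====
-- def get_file_from_diff_line(diff_content: str, diff_line_number: int) -> str:
--     """
--     Attempts to find the file associated with a given line number in a diff.
--     This is a heuristic and might not be perfectly accurate for all diff formats.
--     It assumes the diff_line_number refers to the line number within the raw diff string.
--     """
--     current_file = "unknown_file"
--     line_count = 0
--     for line in diff_content.splitlines():
--         line_count += 1
--         if line.startswith('--- a/') or line.startswith('+++ b/'):
--             # Update current file path when a new file block starts
--             current_file = line[line.find('/') + 1:].strip()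
--
--         # If the target line number is reached, return the current file.
--         # This is a simplification; a true mapping requires parsing diff hunks.
--         if line_count == diff_line_number:
--             return current_file
--     return current_file  # Fallback if line number exceeds diff or file not found
-- ===== SOURCE B (Python) =====
-- def get_file_from_diff_line(diff_content: str, diff_line_number: int) -> str:
--     lines = diff_content.splitlines()
--     if 1 <= diff_line_number <= len(lines):
--         relevant = lines[:diff_line_number]
--     else:
--         relevant = lines
--     for line in reversed(relevant):
--         if line.startswith('--- a/') or line.startswith('+++ b/'):
--             return line[line.find('/') + 1:].strip()
--     return "unknown_file"
-- ===== Notes on version B (the rewrite author's own statement) =====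
-- stated objective: alternative
-- what changed: Replaces the forward counter-and-track loop (which carries a running current_file and returns mid-loop at the target count) by splitting once, selecting the prefix up to the target line (or the whole diff when the line number is out of range, as A falls back), and scanning that slice backwards for the nearest preceding '--- a/'/'+++ b/' header.
import Mathlib
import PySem

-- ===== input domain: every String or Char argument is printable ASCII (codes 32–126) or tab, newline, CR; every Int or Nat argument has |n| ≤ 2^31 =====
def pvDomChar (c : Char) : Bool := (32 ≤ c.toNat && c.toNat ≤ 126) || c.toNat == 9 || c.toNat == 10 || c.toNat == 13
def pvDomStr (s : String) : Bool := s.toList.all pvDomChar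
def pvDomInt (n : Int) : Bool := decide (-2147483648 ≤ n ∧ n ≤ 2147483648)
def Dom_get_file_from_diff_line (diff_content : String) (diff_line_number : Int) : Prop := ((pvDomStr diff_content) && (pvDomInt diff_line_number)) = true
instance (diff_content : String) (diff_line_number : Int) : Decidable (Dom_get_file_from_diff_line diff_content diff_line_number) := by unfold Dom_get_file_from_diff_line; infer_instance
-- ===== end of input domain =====

-- B replaces A's forward counter-and-track loop by a prefix slice plus a backward scan for the
-- nearest header line (objective: alternative decomposition, same cost).

-- ===== PORT A =====
-- shared by both ports: both Python sources contain the identical header test and extraction expression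
def pvIsHeader (line : String) : Bool :=
  PySem.Str.startswith line "--- a/" || PySem.Str.startswith line "+++ b/"

def pvExtract (line : String) : String :=
  PySem.Str.strip (PySem.Str.slice line (some (PySem.Str.find line "/" + 1)) none)

-- A's for-loop with its early return: state (current_file, line_count)
def pvGoA (lines : List String) (current_file : String) (line_count : Int) (diff_line_number : Int) : String :=
  match lines with
  | [] => current_file
  | line :: rest =>
      let line_count := line_count + 1
      let current_file := if pvIsHeader line then pvExtract line else current_file
      if line_count == diff_line_number then current_file
      else pvGoA rest current_file line_count diff_line_number

def get_file_from_diff_line (diff_content : String) (diff_line_number : Int) : String :=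
  pvGoA (PySem.Str.splitlines diff_content) "unknown_file" 0 diff_line_number

-- ===== PORT B =====
-- B's 'for line in reversed(relevant): if header: return …' loop
def pvRevScan (lines : List String) : String :=
  match lines with
  | [] => "unknown_file"
  | line :: rest => if pvIsHeader line then pvExtract line else pvRevScan rest

def get_file_from_diff_line_alt (diff_content : String) (diff_line_number : Int) : String :=
  let lines := PySem.Str.splitlines diff_content
  let relevant :=
    if 1 ≤ diff_line_number ∧ diff_line_number ≤ (lines.length : Int) then
      PySem.List.slice lines none (some diff_line_number)
    else lines
  pvRevScan relevant.reverse

-- ===== PRECONDITION & SPEC =====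
def Spec_get_file_from_diff_line (diff_content : String) (diff_line_number : Int) (out : String) : Prop := out = get_file_from_diff_line_alt diff_content diff_line_number
instance (diff_content : String) (diff_line_number : Int) (out : String) : Decidable (Spec_get_file_from_diff_line diff_content diff_line_number out) := by unfold Spec_get_file_from_diff_line; infer_instance

-- ===== CLAIM (what is proved, stated in full; the proofs are below) =====
def Claim_equal_get_file_from_diff_line : Prop := ∀ (diff_content : String) (diff_line_number : Int), Dom_get_file_from_diff_line diff_content diff_line_number → Spec_get_file_from_diff_line diff_content diff_line_number (get_file_from_diff_line diff_content diff_line_number)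

-- ===== LEMMAS AND PROOFS =====

-- the common loop step: track the most recent header line seen
def pvStep (cur : String) (line : String) : String :=
  if pvIsHeader line then pvExtract line else cur

-- B's backward scan computes the forward fold of pvStep
theorem pvRevScan_reverse (xs : List String) :
    pvRevScan xs.reverse = xs.foldl pvStep "unknown_file" := by
  induction xs using List.reverseRecOn with
  | nil => rfl
  | append_singleton ys l ih =>
      simp [pvRevScan, List.foldl_append, pvStep, ih]

-- A's counting loop characterised: fold over the prefix up to the target count (or everything)
theorem pvGoA_eq (lines : List String) (cur : String) (cnt n : Int) :
    pvGoA lines cur cnt n =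
      (if 1 ≤ n - cnt ∧ n - cnt ≤ (lines.length : Int)
       then (lines.take (n - cnt).toNat).foldl pvStep cur
       else lines.foldl pvStep cur) := by
  induction lines generalizing cur cnt with
  | nil => simp [pvGoA]
  | cons l rest ih =>
      show (if cnt + 1 == n then pvStep cur l
            else pvGoA rest (pvStep cur l) (cnt + 1) n) = _
      by_cases h : cnt + 1 = n
      · have hb : (cnt + 1 == n) = true := by simp [h]
        rw [hb]; simp only [if_true]
        rw [if_pos (by simp only [List.length_cons]; push_cast; omega :
              1 ≤ n - cnt ∧ n - cnt ≤ ((l :: rest).length : Int))]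
        have ht : (n - cnt).toNat = 1 := by omega
        rw [ht]
        rfl
      · have hb : (cnt + 1 == n) = false := by simp [h]
        rw [hb]; simp only [Bool.false_eq_true, if_false]; rw [ih]
        by_cases hin : 1 ≤ n - cnt ∧ n - cnt ≤ ((l :: rest).length : Int)
        · have hin' : 1 ≤ n - cnt ∧ n - cnt ≤ (rest.length : Int) + 1 := by
            simp only [List.length_cons] at hin; push_cast at hin; omega
          rw [if_pos (by omega : 1 ≤ n - (cnt + 1) ∧ n - (cnt + 1) ≤ (rest.length : Int)),
              if_pos hin]
          have ht : (n - cnt).toNat = (n - (cnt + 1)).toNat + 1 := by omega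
          rw [ht, List.take_succ_cons, List.foldl_cons]
        · have hin' : ¬ (1 ≤ n - cnt ∧ n - cnt ≤ (rest.length : Int) + 1) := by
            simp only [List.length_cons] at hin; push_cast at hin; omega
          rw [if_neg (by omega : ¬ (1 ≤ n - (cnt + 1) ∧ n - (cnt + 1) ≤ (rest.length : Int))),
              if_neg hin, List.foldl_cons]

-- ===== VERDICT (by name: the statement is the Claim_ definition above) =====
theorem get_file_from_diff_line_spec : Claim_equal_get_file_from_diff_line := by
  intro d n _
  unfold Spec_get_file_from_diff_line get_file_from_diff_line get_file_from_diff_line_alt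
  rw [pvGoA_eq]
  by_cases h : 1 ≤ n ∧ n ≤ ((PySem.Str.splitlines d).length : Int)
  · rw [if_pos (by omega : 1 ≤ n - 0 ∧ n - 0 ≤ ((PySem.Str.splitlines d).length : Int))]
    simp only [h, if_pos, and_self, pvRevScan_reverse]
    rw [PySem.List.slice_to _ (by omega : (0:Int) ≤ n)]
    norm_num
  · rw [if_neg (by omega)]
    simp only [h, if_false, pvRevScan_reverse]
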